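-- pv_equiv track=rewrite | github.com/OpportuneChicanery/Scriptorium | Desktop/python_work/scriptorium/text_formatter.py | join_hyphenated_words
-- ===== SOURCE A (Python) =====
-- def join_hyphenated_words(words):
-- 	i = 0
--
-- 	while i < len(words) - 1:
-- 		# Check if the current word ends with a hyphen
-- 		if words[i].endswith('-'):
-- 			# Join the current word (without the hyphen) with the next word
-- 			words[i] = words[i][:-1] + words[i + 1]
-- 			# Remove the next word from the list as it's now part of the previous one
-- 			words.pop(i + 1)
-- 		else:
-- 			# Move to the next word
-- 			i += 1
--
-- 	return words
-- ===== SOURCE B (Python) =====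
-- def join_hyphenated_words(words):
-- 	out = []
-- 	for w in words:
-- 		if out and out[-1].endswith('-'):
-- 			out[-1] = out[-1][:-1] + w
-- 		else:
-- 			out.append(w)
-- 	return out
-- ===== Notes on version B (the rewrite author's own statement) =====
-- stated objective: alternative
-- what changed: Replaced the while-loop that repeatedly rewrites and pops from the input list in place with a single left-to-right pass that appends each word to a new accumulator list, merging it into the last accumulated word when that word ends with '-'.
import Mathlib
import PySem

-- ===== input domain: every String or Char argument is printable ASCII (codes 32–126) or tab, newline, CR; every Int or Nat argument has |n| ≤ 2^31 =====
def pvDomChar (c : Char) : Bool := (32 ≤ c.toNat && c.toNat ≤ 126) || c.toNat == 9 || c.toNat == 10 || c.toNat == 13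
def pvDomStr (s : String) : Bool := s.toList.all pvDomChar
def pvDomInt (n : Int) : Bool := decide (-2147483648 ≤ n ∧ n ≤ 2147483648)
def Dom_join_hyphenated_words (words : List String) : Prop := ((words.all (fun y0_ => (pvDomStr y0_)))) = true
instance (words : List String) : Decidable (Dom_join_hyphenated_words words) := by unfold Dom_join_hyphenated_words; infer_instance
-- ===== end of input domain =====

-- B replaces A's rewrite-and-pop while-loop over the input list by a single accumulator pass
-- building a new list; A mutates its argument in place while B builds a fresh list — the
-- equivalence proved here is about the RETURN value only.


-- ===== PORT A =====
-- the while-loop: state is the (mutated) list and the index i; words[i] / words[i+1] are in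
-- range under the loop guard, ported as getD; words.pop(i+1) is eraseIdx (i+1)
def joinA_loop (ws : List String) (i : Nat) : List String :=
  if _h : i < ws.length - 1 then
    if PySem.Str.endswith (ws.getD i "") "-" then
      joinA_loop ((ws.set i
        (PySem.Str.slice (ws.getD i "") none (some (-1)) ++ ws.getD (i + 1) "")).eraseIdx (i + 1)) i
    else
      joinA_loop ws (i + 1)
  else ws
termination_by ws.length - i
decreasing_by
  · have : ((ws.set i (PySem.Str.slice (ws.getD i "") none (some (-1)) ++ ws.getD (i + 1) "")).eraseIdx (i + 1)).length = ws.length - 1 := by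
      simp only [List.length_eraseIdx, List.length_set]
      split <;> omega
    omega
  · omega

def join_hyphenated_words (words : List String) : List String :=
  joinA_loop words 0

-- ===== PORT B =====
-- the for-loop over words: out[-1] (guarded nonempty) is getLastD, out[-1] = … is dropLast ++ […]
def join_hyphenated_words_alt (words : List String) : List String :=
  words.foldl (fun out w =>
    if !out.isEmpty && PySem.Str.endswith (out.getLastD "") "-" then
      out.dropLast ++ [PySem.Str.slice (out.getLastD "") none (some (-1)) ++ w]
    else
      out ++ [w]) []

-- ===== PRECONDITION & SPEC =====
def Spec_join_hyphenated_words (words : List String) (out : List String) : Prop := out = join_hyphenated_words_alt words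
instance (words : List String) (out : List String) : Decidable (Spec_join_hyphenated_words words out) := by unfold Spec_join_hyphenated_words; infer_instance

-- ===== CLAIM (what is proved, stated in full; the proofs are below) =====
def Claim_equal_join_hyphenated_words : Prop := ∀ (words : List String), Dom_join_hyphenated_words words → Spec_join_hyphenated_words words (join_hyphenated_words words)

-- ===== LEMMAS AND PROOFS =====

-- canonical recursive description both ports are reduced to
def hjoin : List String → List String
  | [] => []
  | [w] => [w]
  | w :: v :: rest =>
    if PySem.Str.endswith w "-" then
      hjoin ((PySem.Str.slice w none (some (-1)) ++ v) :: rest)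
    else
      w :: hjoin (v :: rest)
termination_by l => l.length

-- surgery done by one A-loop iteration
theorem set_erase_surgery (ws : List String) (i : Nat) (m : String) (h : i + 1 < ws.length) :
    ((ws.set i m).eraseIdx (i + 1)) = ws.take i ++ m :: ws.drop (i + 1 + 1) := by
  induction ws generalizing i with
  | nil => simp at h
  | cons x ws ih =>
    cases i with
    | zero => cases ws with
      | nil => simp at h
      | cons y ws => simp [List.set_cons_zero, List.eraseIdx]
    | succ j =>
      simp only [List.length_cons] at h
      simp [List.set_cons_succ, ih j (by omega)]

theorem hjoin_short (l : List String) (h : l.length ≤ 1) : hjoin l = l := by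
  match l, h with
  | [], _ => rw [hjoin]
  | [w], _ => rw [hjoin]

theorem joinA_loop_eq (ws : List String) (i : Nat) :
    joinA_loop ws i = ws.take i ++ hjoin (ws.drop i) := by
  fun_induction joinA_loop ws i with
  | case1 ws i h hends ih =>
    have hi1 : i + 1 < ws.length := by omega
    have hi : i < ws.length := by omega
    have hlen : (ws.take i).length = i := by simp; omega
    rw [ih, set_erase_surgery ws i _ hi1,
        List.take_left' hlen, List.drop_left' hlen]
    congr 1
    rw [List.drop_eq_getElem_cons hi, List.drop_eq_getElem_cons hi1, hjoin]
    have ha : ws.getD i "" = ws[i] := List.getD_eq_getElem ws "" hi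
    have hb : ws.getD (i + 1) "" = ws[i + 1] := List.getD_eq_getElem ws "" hi1
    rw [ha] at hends
    rw [ha, hb, if_pos hends]
  | case2 ws i h hends ih =>
    rw [ih]
    have hi : i < ws.length := by omega
    have hi1 : i + 1 < ws.length := by omega
    rw [List.drop_eq_getElem_cons hi, List.drop_eq_getElem_cons hi1, hjoin]
    have ha : ws.getD i "" = ws[i] := List.getD_eq_getElem ws "" hi
    rw [ha] at hends
    rw [if_neg hends, ← List.drop_eq_getElem_cons hi1]
    have ht : List.take (i + 1) ws = List.take i ws ++ [ws[i]] := by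
      rw [List.take_add_one]; simp [List.getElem?_eq_getElem hi]
    rw [ht, List.append_assoc]
    rfl
  | case3 ws i h =>
    rw [hjoin_short _ (by simp; omega)]
    simp

-- one step of the B fold, with the accumulator written as prefix ++ [last]
theorem foldB_eq (ws : List String) : ∀ (as_ : List String) (a : String),
    ws.foldl (fun out w =>
      if !out.isEmpty && PySem.Str.endswith (out.getLastD "") "-" then
        out.dropLast ++ [PySem.Str.slice (out.getLastD "") none (some (-1)) ++ w]
      else
        out ++ [w]) (as_ ++ [a]) = as_ ++ hjoin (a :: ws) := by
  induction ws with
  | nil => intro as_ a; rw [List.foldl_nil, hjoin]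
  | cons w ws ih =>
    intro as_ a
    rw [List.foldl_cons]
    simp only [List.getLastD_concat, List.dropLast_concat]
    have hne : (!(as_ ++ [a]).isEmpty) = true := by simp
    rw [hne, Bool.true_and]
    by_cases he : PySem.Str.endswith a "-" = true
    · rw [if_pos he, ih]
      congr 1
      rw [hjoin, if_pos he]
    · rw [if_neg he, ih, hjoin, if_neg he]
      simp

theorem altB_eq (ws : List String) : join_hyphenated_words_alt ws = hjoin ws := by
  unfold join_hyphenated_words_alt
  cases ws with
  | nil => rw [List.foldl_nil, hjoin]
  | cons w ws =>
    rw [List.foldl_cons]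
    have : (if !(List.isEmpty ([] : List String)) && PySem.Str.endswith (([] : List String).getLastD "") "-" then
        ([] : List String).dropLast ++ [PySem.Str.slice (([] : List String).getLastD "") none (some (-1)) ++ w]
      else ([] : List String) ++ [w]) = ([] ++ [w] : List String) := by simp
    rw [this]
    simpa using foldB_eq ws [] w

-- ===== VERDICT (by name: the statement is the Claim_ definition above) =====
theorem join_hyphenated_words_spec : Claim_equal_join_hyphenated_words := by
  intro words _
  unfold Spec_join_hyphenated_words join_hyphenated_words
  rw [joinA_loop_eq, altB_eq]
  simp
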